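-- pv_equiv track=rewrite | github.com/Emilianodevaleri/ITS | recupero/esercizio1.py | tupladict
-- ===== SOURCE A (Python) =====
-- def tupladict(listat:list[tuple]) -> dict:
--     dict = {}
--     for key,value in listat:
--         if key in dict:
--             dict[key] += value
--         else:
--             dict[key] = value
--     return dict
-- ===== SOURCE B (Python) =====
-- def tupladict(listat):
--     # Two passes: group values by key (first-appearance order), then fold
--     # each group starting from its first value.
--     groups = {}
--     for key, value in listat:
--         groups.setdefault(key, []).append(value)
--     result = {}
--     for key, values in groups.items():
--         acc = values[0]
--         for v in values[1:]:
--             acc += v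
--         result[key] = acc
--     return result
-- ===== Notes on version B (the rewrite author's own statement) =====
-- stated objective: alternative
-- what changed: B replaces A's single-pass running-total dict update with a two-pass decomposition: first group values per key into lists in first-appearance order, then reduce each group by folding from its first element.
import Mathlib
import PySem

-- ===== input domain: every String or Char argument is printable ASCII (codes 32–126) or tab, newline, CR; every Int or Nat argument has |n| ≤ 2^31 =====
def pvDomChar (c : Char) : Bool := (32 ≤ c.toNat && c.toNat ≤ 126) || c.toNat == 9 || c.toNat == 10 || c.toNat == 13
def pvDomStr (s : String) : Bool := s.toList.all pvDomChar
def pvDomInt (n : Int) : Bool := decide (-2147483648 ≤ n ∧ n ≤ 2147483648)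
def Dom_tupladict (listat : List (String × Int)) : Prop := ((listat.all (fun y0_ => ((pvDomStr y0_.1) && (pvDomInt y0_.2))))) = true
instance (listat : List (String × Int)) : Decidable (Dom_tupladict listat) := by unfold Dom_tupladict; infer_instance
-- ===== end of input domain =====

-- B regroups the tuples per key first and then folds each group from its first
-- value (a two-pass decomposition), instead of A's single running-total dict; alternative, same cost.


-- ===== PORT A =====
def tupladict (listat : List (String × Int)) : List (String × Int) :=
  (listat.foldl (fun d p =>
      if d.contains p.1 then d.insert p.1 (d.getD p.1 0 + p.2)
      else d.insert p.1 p.2) PySem.Dict.empty).items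

-- ===== PORT B =====
-- acc = values[0]; for v in values[1:]: acc += v   (values is nonempty for every
-- group B builds, so headD's default is never read; exact there)
def pvFoldGroup (vs : List Int) : Int := (vs.drop 1).foldl (· + ·) (vs.headD 0)

def tupladict_alt (listat : List (String × Int)) : List (String × Int) :=
  let groups := listat.foldl (fun g p => g.modify p.1 [] (· ++ [p.2])) PySem.Dict.empty
  (groups.items.foldl (fun r p => r.insert p.1 (pvFoldGroup p.2)) PySem.Dict.empty).items

-- ===== PRECONDITION & SPEC =====
def Spec_tupladict (listat : List (String × Int)) (out : List (String × Int)) : Prop := out = tupladict_alt listat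
instance (listat : List (String × Int)) (out : List (String × Int)) : Decidable (Spec_tupladict listat out) := by unfold Spec_tupladict; infer_instance

-- ===== CLAIM (what is proved, stated in full; the proofs are below) =====
def Claim_equal_tupladict : Prop := ∀ (listat : List (String × Int)), Dom_tupladict listat → Spec_tupladict listat (tupladict listat)

-- ===== LEMMAS AND PROOFS =====

-- projecting each group to its sum
def pvSum (p : String × List Int) : String × Int := (p.1, p.2.sum)

-- folding a group from its first element is its sum
theorem pvFoldGroup_eq_sum (vs : List Int) : pvFoldGroup vs = vs.sum := by
  cases vs with
  | nil => rfl
  | cons h t =>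
    simp only [pvFoldGroup, List.drop_succ_cons, List.drop_zero, List.headD]
    induction t generalizing h with
    | nil => simp
    | cons x xs ih => simp [List.foldl_cons, ih]; ring

theorem pv_contains_map_sum (l : List (String × List Int)) (k : String) :
    (PySem.Dict.mk (l.map pvSum)).contains k = (PySem.Dict.mk l).contains k := by
  simp only [PySem.Dict.contains, List.any_map]
  rfl

theorem pv_get?_map_sum (l : List (String × List Int)) (k : String) :
    (PySem.Dict.mk (l.map pvSum)).get? k = ((PySem.Dict.mk l).get? k).map List.sum := by
  induction l with
  | nil => simp [PySem.Dict.get?]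
  | cons p t ih =>
    obtain ⟨a, vs⟩ := p
    simp only [List.map_cons, pvSum, PySem.Dict.get?_mk_cons]
    by_cases hk : (a == k) = true
    · simp [hk]
    · simp [hk, ih]

theorem pv_getD_map_sum (l : List (String × List Int)) (k : String) :
    (PySem.Dict.mk (l.map pvSum)).getD k 0 = ((PySem.Dict.mk l).getD k []).sum := by
  simp only [PySem.Dict.getD, pv_get?_map_sum]
  cases (PySem.Dict.mk l).get? k <;> simp

theorem pv_inv (l : List (String × Int)) (g : PySem.Dict String (List Int)) :
    (l.foldl (fun d p =>
        if d.contains p.1 then d.insert p.1 (d.getD p.1 0 + p.2)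
        else d.insert p.1 p.2) (PySem.Dict.mk (g.items.map pvSum))).items =
      (l.foldl (fun g p => g.modify p.1 [] (· ++ [p.2])) g).items.map pvSum := by
  induction l generalizing g with
  | nil => simp
  | cons p t ih =>
    obtain ⟨k, v⟩ := p
    simp only [List.foldl_cons]
    have hstep :
        (if (PySem.Dict.mk (g.items.map pvSum)).contains k = true then
            (PySem.Dict.mk (g.items.map pvSum)).insert k
              ((PySem.Dict.mk (g.items.map pvSum)).getD k 0 + v)
          else (PySem.Dict.mk (g.items.map pvSum)).insert k v) =
          PySem.Dict.mk ((g.modify k [] (· ++ [v])).items.map pvSum) := by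
      rw [pv_contains_map_sum, pv_getD_map_sum]
      by_cases hc : g.contains k = true
      · -- key present: both sides rewrite the existing entry in place
        apply PySem.Dict.ext
        have hc' : (PySem.Dict.mk (g.items.map pvSum)).contains k = true := by
          rw [pv_contains_map_sum]; exact hc
        simp only [hc, if_pos, PySem.Dict.modify, PySem.Dict.insert, hc', List.map_map]
        refine List.map_congr_left ?_
        intro a _
        rcases eq_or_ne a.1 k with hk | hk
        · simp [pvSum, hk, PySem.Dict.getD, List.sum_append]
        · simp [pvSum, hk]
      · -- fresh key: both sides append; the fresh group is [v]
        apply PySem.Dict.ext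
        have hcf : g.contains k = false := by simpa using hc
        have hc' : (PySem.Dict.mk (g.items.map pvSum)).contains k = false := by
          rw [pv_contains_map_sum]; exact hcf
        have hg0 : g.getD k [] = [] := PySem.Dict.getD_of_not_contains _ _ hcf
        simp only [hc, PySem.Dict.modify, PySem.Dict.insert, hc',
          Bool.false_eq_true, if_false]
        simp [hg0, pvSum]
    rw [hstep]
    exact ih (g.modify k [] (· ++ [v]))

-- ===== VERDICT (by name: the statement is the Claim_ definition above) =====
theorem tupladict_spec : Claim_equal_tupladict := by
  intro listat _
  unfold Spec_tupladict tupladict tupladict_alt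
  set groups := listat.foldl (fun g p => g.modify p.1 [] (· ++ [p.2])) PySem.Dict.empty with hg
  have hA : (listat.foldl (fun d p =>
      if d.contains p.1 then d.insert p.1 (d.getD p.1 0 + p.2)
      else d.insert p.1 p.2) PySem.Dict.empty).items = groups.items.map pvSum := by
    have := pv_inv listat PySem.Dict.empty
    simpa using this
  have hfresh : ∀ p ∈ groups.items, (PySem.Dict.empty : PySem.Dict String Int).contains p.1 = false := by
    intro p _; simp
  have hnd : (groups.items.map (fun p => p.1)).Nodup := by
    have : groups.keys.Nodup := by
      rw [hg]
      exact PySem.Dict.nodup_keys_foldl_modify_key listat (fun p => p.1) [] _ _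
        PySem.Dict.nodup_keys_empty
    simpa [PySem.Dict.keys] using this
  have hB : (groups.items.foldl (fun r p => r.insert p.1 (pvFoldGroup p.2))
      PySem.Dict.empty).items = groups.items.map (fun p => (p.1, pvFoldGroup p.2)) := by
    have := PySem.Dict.items_foldl_insert_fresh (l := groups.items)
      (k := fun p => p.1) (v := fun p => pvFoldGroup p.2) (d := PySem.Dict.empty)
      hfresh hnd
    simpa using this
  rw [hA, hB]
  exact List.map_congr_left (fun a _ => by simp [pvSum, pvFoldGroup_eq_sum])
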